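-- pv_equiv track=rewrite | github.com/FernandoZap/testecvs | app01/importacao_excel.py | fun_salario100h
-- ===== SOURCE A (Python) =====
-- def fun_salario100h(psalario_100h,plista_sal100,plista_sal200):
--     sal100_0 = int(psalario_100h)-1
--     sal100_1 = int(psalario_100h)
--     sal100_2 = int(psalario_100h)+1
--
--     for kls in plista_sal100:
--         if kls==sal100_0:
--             return kls
--
--     for kls in plista_sal100:
--         if kls == sal100_1:
--             return kls
--
--     for kls in plista_sal100:
--         if kls == sal100_2:
--             return kls
--
--     return psalario_100h
-- ===== SOURCE B (Python) =====
-- def fun_salario100h(psalario_100h, plista_sal100, plista_sal200):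
--     t = int(psalario_100h)
--     best_p = 3
--     best_e = psalario_100h
--     for kls in plista_sal100:
--         if kls == t - 1:
--             pr = 0
--         elif kls == t:
--             pr = 1
--         elif kls == t + 1:
--             pr = 2
--         else:
--             continue
--         if pr < best_p:
--             best_p, best_e = pr, kls
--             if pr == 0:
--                 break
--     return best_e
-- ===== Notes on version B (the rewrite author's own statement) =====
-- stated objective: alternative
-- what changed: Replaces A's three successive scans of plista_sal100 (for p-1, then p, then p+1) by a single pass that tracks the best priority seen so far and breaks early on priority 0.
import Mathlib
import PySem

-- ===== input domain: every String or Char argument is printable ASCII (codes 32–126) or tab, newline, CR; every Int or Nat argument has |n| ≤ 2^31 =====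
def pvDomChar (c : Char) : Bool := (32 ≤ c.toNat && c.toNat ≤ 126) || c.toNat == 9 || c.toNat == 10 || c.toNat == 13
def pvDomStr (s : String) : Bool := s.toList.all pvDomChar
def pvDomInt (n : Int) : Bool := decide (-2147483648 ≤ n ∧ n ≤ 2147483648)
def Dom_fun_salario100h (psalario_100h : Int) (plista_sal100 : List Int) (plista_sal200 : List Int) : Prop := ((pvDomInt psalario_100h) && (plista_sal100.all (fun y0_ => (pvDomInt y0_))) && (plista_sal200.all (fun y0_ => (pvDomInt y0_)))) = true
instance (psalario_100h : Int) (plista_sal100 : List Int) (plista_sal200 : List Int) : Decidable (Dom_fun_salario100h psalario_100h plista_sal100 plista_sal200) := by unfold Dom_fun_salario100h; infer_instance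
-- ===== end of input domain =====

-- B replaces A's three successive scans of plista_sal100 by a single priority-tracking pass (alternative traversal, same cost).

-- ===== PORT A =====
-- helper: one Python 'for kls in xs: if kls == target: return kls' loop
def pvScanA (target : Int) : List Int → Option Int
  | [] => none
  | kls :: rest => if kls = target then some kls else pvScanA target rest

def fun_salario100h (psalario_100h : Int) (plista_sal100 : List Int) (plista_sal200 : List Int) : Int :=
  let sal100_0 := psalario_100h - 1
  let sal100_1 := psalario_100h
  let sal100_2 := psalario_100h + 1
  match pvScanA sal100_0 plista_sal100 with
  | some kls => kls
  | none =>
    match pvScanA sal100_1 plista_sal100 with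
    | some kls => kls
    | none =>
      match pvScanA sal100_2 plista_sal100 with
      | some kls => kls
      | none => psalario_100h

-- ===== PORT B =====
-- helper: the single for-loop of Source B with state (best_p, best_e); 'break' = return state now
def pvLoopB (t : Int) : List Int → Int → Int → Int × Int
  | [], bp, be => (bp, be)
  | kls :: rest, bp, be =>
    if kls = t - 1 then
      (if 0 < bp then (0, kls) else pvLoopB t rest bp be)
    else if kls = t then
      (if 1 < bp then pvLoopB t rest 1 kls else pvLoopB t rest bp be)
    else if kls = t + 1 then
      (if 2 < bp then pvLoopB t rest 2 kls else pvLoopB t rest bp be)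
    else pvLoopB t rest bp be

def fun_salario100h_alt (psalario_100h : Int) (plista_sal100 : List Int) (plista_sal200 : List Int) : Int :=
  let t := psalario_100h
  (pvLoopB t plista_sal100 3 psalario_100h).2

-- ===== PRECONDITION & SPEC =====

def Spec_fun_salario100h (psalario_100h : Int) (plista_sal100 : List Int) (plista_sal200 : List Int) (out : Int) : Prop := out = fun_salario100h_alt psalario_100h plista_sal100 plista_sal200
instance (psalario_100h : Int) (plista_sal100 : List Int) (plista_sal200 : List Int) (out : Int) : Decidable (Spec_fun_salario100h psalario_100h plista_sal100 plista_sal200 out) := by unfold Spec_fun_salario100h; infer_instance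

-- ===== CLAIM (what is proved, stated in full; the proofs are below) =====
def Claim_equal_fun_salario100h : Prop := ∀ (psalario_100h : Int) (plista_sal100 : List Int) (plista_sal200 : List Int), Dom_fun_salario100h psalario_100h plista_sal100 plista_sal200 → Spec_fun_salario100h psalario_100h plista_sal100 plista_sal200 (fun_salario100h psalario_100h plista_sal100 plista_sal200)

-- ===== LEMMAS AND PROOFS =====
lemma pvScanA_eq (t : Int) (xs : List Int) :
    pvScanA t xs = if t ∈ xs then some t else none := by
  induction xs with
  | nil => simp [pvScanA]
  | cons k rest ih =>
    simp only [pvScanA, ih, List.mem_cons]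
    by_cases h : k = t
    · subst h; simp
    · simp [h, Ne.symm h]

lemma pvLoopB_eq (t : Int) (xs : List Int) (bp be : Int) :
    (pvLoopB t xs bp be).2 =
      if 0 < bp ∧ (t - 1) ∈ xs then t - 1
      else if 1 < bp ∧ t ∈ xs then t
      else if 2 < bp ∧ (t + 1) ∈ xs then t + 1
      else be := by
  induction xs generalizing bp be with
  | nil => simp [pvLoopB]
  | cons k rest ih =>
    simp only [pvLoopB, List.mem_cons]
    by_cases h0 : k = t - 1
    · subst h0
      by_cases hb : (0:Int) < bp
      · simp [hb]
      · have h1 : ¬ (1:Int) < bp := by omega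
        have h2 : ¬ (2:Int) < bp := by omega
        rw [if_pos rfl, if_neg hb, ih]
        simp [hb, h1, h2]
    · by_cases h1 : k = t
      · subst h1
        have hk0 : (k : Int) ≠ k - 1 := by omega
        by_cases hb : (1:Int) < bp
        · rw [if_neg h0, if_pos rfl, if_pos hb, ih]
          have hb0 : (0:Int) < bp := by omega
          simp [hb, hb0, Ne.symm h0]
        · rw [if_neg h0, if_pos rfl, if_neg hb, ih]
          have h2 : ¬ (2:Int) < bp := by omega
          by_cases hb0 : (0:Int) < bp
          · simp [hb, h2, hb0, Ne.symm h0]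
          · simp [hb, h2, hb0]
      · by_cases h2 : k = t + 1
        · subst h2
          by_cases hb : (2:Int) < bp
          · rw [if_neg h0, if_neg h1, if_pos rfl, if_pos hb, ih]
            have hb0 : (0:Int) < bp := by omega
            have hb1 : (1:Int) < bp := by omega
            simp [hb, hb0, hb1, Ne.symm h0, Ne.symm h1]
          · rw [if_neg h0, if_neg h1, if_pos rfl, if_neg hb, ih]
            simp [hb, Ne.symm h0, Ne.symm h1]
        · rw [if_neg h0, if_neg h1, if_neg h2, ih]
          simp [Ne.symm h0, Ne.symm h1, Ne.symm h2]

-- ===== VERDICT (by name: the statement is the Claim_ definition above) =====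
theorem fun_salario100h_spec : Claim_equal_fun_salario100h := by
  intro p l1 l2 _
  show fun_salario100h p l1 l2 = fun_salario100h_alt p l1 l2
  simp only [fun_salario100h, fun_salario100h_alt, pvScanA_eq, pvLoopB_eq]
  by_cases h0 : (p - 1) ∈ l1 <;> by_cases h1 : p ∈ l1 <;> by_cases h2 : (p + 1) ∈ l1 <;>
    simp [h0, h1, h2]
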